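-- pv_equiv track=rewrite | github.com/ztime/polska | FolkWiki.py | _filter_song_folk_rnn
-- ===== SOURCE A (Python) =====
-- def _filter_song_folk_rnn(song_lines, valid_info):
--     #Function to reduce linesize
--     def r(key, hay):
--         return hay.get(key, "")
--     v = {}
--     songs_in_key = {}
--     current_parsing_song = False
--     current_parsing_song_key = None
--     for line in song_lines:
--         if len(line.strip()) == 0:
--             continue
--         s = line.split(":")
--         if s[0] == 'K' and len(s) == 2:
--             current_parsing_song_key = s[1].strip()
--             current_parsing_song = True
--             songs_in_key[current_parsing_song_key] = []
--             #Skip to the next line with actual song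
--             continue
--         if current_parsing_song:
--             songs_in_key[current_parsing_song_key].append(line.strip())
--             #more song lines
--             continue
--         if s[0] in valid_info:
--             v[s[0]] = s[1].strip()
--     #One file can contain several keys
--     for key,song in songs_in_key.items():
--         ret = [ r(x,v) for x in valid_info ]
--         ret.append(key)
--         ret.append(''.join(song))
--         yield ret
-- ===== SOURCE B (Python) =====
-- def _filter_song_folk_rnn(song_lines, valid_info):
--     # B: phase decomposition — filter blanks, split off the header before the
--     # first K-line, build the info dict from the header, then cut the body into
--     # K-delimited segments and join each segment's stripped lines at once.
--     def is_key_line(line):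
--         parts = line.split(":")
--         return len(parts) == 2 and parts[0] == "K"
--
--     lines = [l for l in song_lines if l.strip()]
--     i = 0
--     while i < len(lines) and not is_key_line(lines[i]):
--         i += 1
--     header, body = lines[:i], lines[i:]
--
--     v = {p[0]: p[1].strip()
--          for p in (l.split(":") for l in header) if p[0] in valid_info}
--
--     songs = {}
--     while body:
--         key = body[0].split(":")[1].strip()
--         j = 1
--         while j < len(body) and not is_key_line(body[j]):
--             j += 1
--         songs[key] = "".join(l.strip() for l in body[1:j])
--         body = body[j:]
--
--     for key, song in songs.items():
--         yield [v.get(x, "") for x in valid_info] + [key, song]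
-- ===== Notes on version B (the rewrite author's own statement) =====
-- stated objective: alternative
-- what changed: A's single pass with a four-variable state machine (v, songs_in_key, current_parsing_song, key) is replaced by a phase decomposition: filter out blank lines, split the list into header and body at the first K-line, build the info dict from the header alone, then cut the body into K-delimited segments and insert each segment's joined stripped lines with one dict write per segment.
-- outside the precondition, e.g. on _filter_song_folk_rnn(['T'], ['T']): A raises IndexError, B raises IndexError
import Mathlib
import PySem

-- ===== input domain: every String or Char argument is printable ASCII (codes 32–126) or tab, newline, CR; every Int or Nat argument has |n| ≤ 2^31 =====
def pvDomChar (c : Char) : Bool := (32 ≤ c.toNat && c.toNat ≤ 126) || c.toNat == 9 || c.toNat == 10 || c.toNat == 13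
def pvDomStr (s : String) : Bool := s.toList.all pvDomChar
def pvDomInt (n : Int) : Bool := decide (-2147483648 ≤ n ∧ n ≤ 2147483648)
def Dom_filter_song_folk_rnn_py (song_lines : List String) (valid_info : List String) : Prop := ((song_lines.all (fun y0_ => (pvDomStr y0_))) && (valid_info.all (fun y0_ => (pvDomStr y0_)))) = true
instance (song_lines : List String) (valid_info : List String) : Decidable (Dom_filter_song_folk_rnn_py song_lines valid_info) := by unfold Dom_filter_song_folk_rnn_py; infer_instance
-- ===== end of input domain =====

-- B replaces A's one-pass four-variable state machine by a phase decomposition (filter blanks,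
-- split header from body at the first K-line, segment the body at K-lines); same return values,
-- no speed claim ("alternative"). Neither program mutates its arguments.

-- line.split(":")  (the separator ":" is non-empty, so split? is always `some`)
def splitColon (line : String) : List String := (PySem.Str.split? line ":").getD []

-- ===== PORT A =====
-- A's loop state: (v, songs_in_key, current_parsing_song, current_parsing_song_key).
-- Python's key starts as None and is only read after being set; "" stands in for None.
abbrev AState : Type := PySem.Dict String String × PySem.Dict String (List String) × Bool × String

-- A's loop body after the blank-line `continue`.  s[1] on Python's raising IndexError path
-- is ported as `pyGetD s 1 ""`; Pre_ excludes exactly those inputs.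
def aInner (valid_info : List String) (st : AState) (line : String) : AState :=
  let s := splitColon line
  if PySem.List.pyGetD s 0 "" = "K" ∧ s.length = 2 then
    let k := PySem.Str.strip (PySem.List.pyGetD s 1 "")
    (st.1, st.2.1.insert k [], true, k)
  else if st.2.2.1 then
    -- songs_in_key[key].append(line.strip()): the key is always present here, so modify = append
    (st.1, st.2.1.modify st.2.2.2 [] (· ++ [PySem.Str.strip line]), st.2.2.1, st.2.2.2)
  else if PySem.List.pyGetD s 0 "" ∈ valid_info then
    (st.1.insert (PySem.List.pyGetD s 0 "") (PySem.Str.strip (PySem.List.pyGetD s 1 "")), st.2.1, st.2.2.1, st.2.2.2)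
  else st

def filter_song_folk_rnn_py (song_lines : List String) (valid_info : List String) : List (List String) :=
  let fin := song_lines.foldl
    (fun st line => if PySem.Str.strip line = "" then st else aInner valid_info st line)
    (PySem.Dict.empty, PySem.Dict.empty, false, "")
  -- the trailing yield loop over songs_in_key.items()
  fin.2.1.items.map (fun p => valid_info.map (fun x => fin.1.getD x "") ++ [p.1, PySem.Str.join "" p.2])

-- ===== PORT B =====
def isKeyLineB (line : String) : Bool :=
  let parts := splitColon line
  parts.length == 2 && PySem.List.pyGetD parts 0 "" == "K"

def joinStripsB (seg : List String) : String := PySem.Str.join "" (seg.map PySem.Str.strip)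

-- the header dict comprehension's filter/insert step (last write wins, like Python's dict)
def vStepB (valid_info : List String) (d : PySem.Dict String String) (l : String) : PySem.Dict String String :=
  let p := splitColon l
  if PySem.List.pyGetD p 0 "" ∈ valid_info then
    d.insert (PySem.List.pyGetD p 0 "") (PySem.Str.strip (PySem.List.pyGetD p 1 ""))
  else d

-- B's `while body:` segmentation loop: key from the K-line, one insert per segment
def segLoopB (songs : PySem.Dict String String) (body : List String) : PySem.Dict String String :=
  match body with
  | [] => songs
  | kl :: tl =>
    let key := PySem.Str.strip (PySem.List.pyGetD (splitColon kl) 1 "")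
    let seg := tl.takeWhile (fun l => !isKeyLineB l)
    let rest := tl.dropWhile (fun l => !isKeyLineB l)
    segLoopB (songs.insert key (joinStripsB seg)) rest
termination_by body.length
decreasing_by
  simp only [List.length_cons]
  exact Nat.lt_succ_of_le (List.length_dropWhile_le _ _)

def filter_song_folk_rnn_py_alt (song_lines : List String) (valid_info : List String) : List (List String) :=
  let lines := song_lines.filter (fun l => PySem.Str.strip l ≠ "")
  let header := lines.takeWhile (fun l => !isKeyLineB l)
  let body := lines.dropWhile (fun l => !isKeyLineB l)
  let v := header.foldl (vStepB valid_info) PySem.Dict.empty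
  let songs := segLoopB PySem.Dict.empty body
  songs.items.map (fun p => valid_info.map (fun x => v.getD x "") ++ [p.1, p.2])

-- ===== PRECONDITION & SPEC =====
-- Pre_ excludes exactly the inputs on which Python A raises IndexError (`s[1]` on a non-blank
-- line before the first K-line that contains no ':' and whose whole text is in valid_info);
-- Python B raises IndexError on exactly the same inputs, so nothing returnable is excluded.
def Pre_filter_song_folk_rnn_py (song_lines : List String) (valid_info : List String) : Prop :=
  ∀ l ∈ (song_lines.filter (fun l => PySem.Str.strip l ≠ "")).takeWhile (fun l => !isKeyLineB l),
    (splitColon l).length = 1 → l ∉ valid_info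
instance (song_lines : List String) (valid_info : List String) : Decidable (Pre_filter_song_folk_rnn_py song_lines valid_info) := by unfold Pre_filter_song_folk_rnn_py; infer_instance

def pvWitness_filter_song_folk_rnn_py : List String × List String :=
  (["T:Polska", "M:3/4", "", "K:Dm", "abc def", "g2", "K:G", "xy"], ["T", "M", "R"])

def Spec_filter_song_folk_rnn_py (song_lines : List String) (valid_info : List String) (out : List (List String)) : Prop := out = filter_song_folk_rnn_py_alt song_lines valid_info
instance (song_lines : List String) (valid_info : List String) (out : List (List String)) : Decidable (Spec_filter_song_folk_rnn_py song_lines valid_info out) := by unfold Spec_filter_song_folk_rnn_py; infer_instance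

-- ===== CLAIM (what is proved, stated in full; the proofs are below) =====
def Claim_equal_filter_song_folk_rnn_py : Prop := ∀ (song_lines : List String) (valid_info : List String), Dom_filter_song_folk_rnn_py song_lines valid_info → Pre_filter_song_folk_rnn_py song_lines valid_info → Spec_filter_song_folk_rnn_py song_lines valid_info (filter_song_folk_rnn_py song_lines valid_info)

-- ===== LEMMAS AND PROOFS =====
-- (the two ports in fact agree on ALL inputs: both ports read the missing s[1] as "",
-- so the proofs below never need Pre_; Pre_ is there because the two Pythons raise there)

-- the value-wise relation between A's songs dict (lists of stripped lines) and B's (joined strings)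
def fJoin (p : String × List String) : String × String := (p.1, PySem.Str.join "" p.2)

-- A's whole fold = fold of aInner over the blank-filtered lines (the `continue` becomes a filter)
lemma a_fold_filter (song_lines valid_info : List String) (init : AState) :
    song_lines.foldl
      (fun st line => if PySem.Str.strip line = "" then st else aInner valid_info st line) init
    = (song_lines.filter (fun l => PySem.Str.strip l ≠ "")).foldl (aInner valid_info) init := by
  induction song_lines generalizing init with
  | nil => rfl
  | cons a t ih =>
    by_cases h : PySem.Str.strip a = "" <;> simp [h, ih]

lemma not_key (l : String) (h : isKeyLineB l = false) :
    ¬ (PySem.List.pyGetD (splitColon l) 0 "" = "K" ∧ (splitColon l).length = 2) := by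
  simp [isKeyLineB] at h
  rintro ⟨h1, h2⟩
  exact (h h2) h1

-- header phase: before the first K-line A only builds v (and does so exactly like vStepB)
lemma header_fold (hd : List String) (valid_info : List String) :
    ∀ (v : PySem.Dict String String) (songs : PySem.Dict String (List String)) (k0 : String),
    (∀ l ∈ hd, isKeyLineB l = false) →
    hd.foldl (aInner valid_info) (v, songs, false, k0)
      = (hd.foldl (vStepB valid_info) v, songs, false, k0) := by
  induction hd with
  | nil => intro v songs k0 _; rfl
  | cons a t ih =>
    intro v songs k0 h
    have ha := not_key a (h a (by simp))
    have step : aInner valid_info (v, songs, false, k0) a = (vStepB valid_info v a, songs, false, k0) := by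
      simp only [aInner, vStepB]
      rw [if_neg ha]
      simp only [if_neg (Bool.false_ne_true)]
      split <;> rfl
    simp only [List.foldl_cons, step]
    exact ih _ _ _ (fun l hl => h l (by simp [hl]))

-- segment phase: non-K lines only append to the current key's list
lemma seg_fold (seg : List String) (valid_info : List String) :
    ∀ (v : PySem.Dict String String) (S : PySem.Dict String (List String)) (k : String),
    (∀ l ∈ seg, isKeyLineB l = false) →
    seg.foldl (aInner valid_info) (v, S, true, k)
      = (v, seg.foldl (fun d l => d.modify k [] (· ++ [PySem.Str.strip l])) S, true, k) := by
  induction seg with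
  | nil => intro v S k _; rfl
  | cons a t ih =>
    intro v S k h
    have ha := not_key a (h a (by simp))
    have step : aInner valid_info (v, S, true, k) a
        = (v, S.modify k [] (· ++ [PySem.Str.strip a]), true, k) := by
      simp only [aInner]
      rw [if_neg ha]
      rfl
    simp only [List.foldl_cons, step]
    exact ih _ _ _ (fun l hl => h l (by simp [hl]))

-- the append loop over a freshly inserted key collapses to one insert
lemma modify_fold (seg : List String) :
    ∀ (S : PySem.Dict String (List String)) (k : String) (w : List String),
    seg.foldl (fun d l => d.modify k [] (· ++ [PySem.Str.strip l])) (S.insert k w)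
      = S.insert k (w ++ seg.map PySem.Str.strip) := by
  induction seg with
  | nil => intro S k w; simp
  | cons a t ih =>
    intro S k w
    have step : (S.insert k w).modify k [] (· ++ [PySem.Str.strip a])
        = S.insert k (w ++ [PySem.Str.strip a]) := by
      simp [PySem.Dict.modify, PySem.Dict.getD_insert_self, PySem.Dict.insert_insert_self]
    simp only [List.foldl_cons, step, ih]
    simp

-- insert commutes with the value-wise join relation
lemma items_map_insert (S : PySem.Dict String (List String)) (T : PySem.Dict String String)
    (k : String) (w : List String) (h : T.items = S.items.map fJoin) :
    (T.insert k (PySem.Str.join "" w)).items = ((S.insert k w).items).map fJoin := by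
  have hc : T.contains k = S.contains k := by
    have he : ((fun p : String × String => p.1 == k) ∘ fJoin) = (fun p : String × List String => p.1 == k) := by
      funext p; simp [fJoin]
    simp [PySem.Dict.contains, h, List.any_map, he]
  by_cases hk : S.contains k = true
  · rw [PySem.Dict.items_insert_of_contains _ _ (hc ▸ hk),
        PySem.Dict.items_insert_of_contains _ _ hk, h, List.map_map, List.map_map]
    apply List.map_congr_left
    intro p _
    by_cases hp : p.1 == k <;> simp [fJoin, Function.comp, hp]
  · have hk' : S.contains k = false := by simpa using hk
    rw [PySem.Dict.items_insert_of_not_contains _ _ (hc ▸ hk'),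
        PySem.Dict.items_insert_of_not_contains _ _ hk', h]
    simp [fJoin]

-- body phase: A's remaining fold tracks B's segmentation loop through the join relation
lemma body_fold (n : Nat) : ∀ (body : List String) (valid_info : List String)
    (v : PySem.Dict String String) (S : PySem.Dict String (List String))
    (T : PySem.Dict String String) (p0 : Bool) (k0 : String),
    body.length ≤ n →
    (∀ h : body ≠ [], isKeyLineB (body.head h) = true) →
    T.items = S.items.map fJoin →
    (body.foldl (aInner valid_info) (v, S, p0, k0)).1 = v ∧
    ((body.foldl (aInner valid_info) (v, S, p0, k0)).2.1).items.map fJoin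
      = (segLoopB T body).items := by
  induction n with
  | zero =>
    intro body _ v S T p0 k0 hn _ h
    have : body = [] := List.eq_nil_of_length_eq_zero (Nat.le_zero.mp hn)
    subst this
    exact ⟨rfl, by simpa [segLoopB] using h.symm⟩
  | succ n ih =>
    intro body valid_info v S T p0 k0 hn hhead h
    match body with
    | [] => exact ⟨rfl, by simpa [segLoopB] using h.symm⟩
    | kl :: tl =>
      have hk : isKeyLineB kl = true := hhead (by simp)
      have hk' : PySem.List.pyGetD (splitColon kl) 0 "" = "K" ∧ (splitColon kl).length = 2 := by
        simp [isKeyLineB] at hk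
        exact ⟨hk.2, hk.1⟩
      set key := PySem.Str.strip (PySem.List.pyGetD (splitColon kl) 1 "") with hkey
      have step : aInner valid_info (v, S, p0, k0) kl = (v, S.insert key [], true, key) := by
        simp only [aInner]
        rw [if_pos hk']
      set seg := tl.takeWhile (fun l => !isKeyLineB l) with hseg
      set rest := tl.dropWhile (fun l => !isKeyLineB l) with hrest
      have htl : tl = seg ++ rest := (List.takeWhile_append_dropWhile).symm
      have hsegok : ∀ l ∈ seg, isKeyLineB l = false := by
        intro l hl
        have := List.mem_takeWhile_imp hl
        simpa using this
      have hfold : (kl :: tl).foldl (aInner valid_info) (v, S, p0, k0)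
          = rest.foldl (aInner valid_info) (v, S.insert key (seg.map PySem.Str.strip), true, key) := by
        rw [List.foldl_cons, step, htl, List.foldl_append, seg_fold seg valid_info _ _ _ hsegok,
            modify_fold]
        simp
      rw [hfold]
      have hrestlen : rest.length ≤ n := by
        have h1 : rest.length ≤ tl.length := List.length_dropWhile_le _ _
        have h2 : tl.length ≤ n := by simpa using Nat.lt_succ_iff.mp (Nat.lt_of_lt_of_le (by simp) hn)
        omega
      have hresthead : ∀ h : rest ≠ [], isKeyLineB (rest.head h) = true := by
        intro hne
        have := List.head_dropWhile_not (fun l => !isKeyLineB l) hne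
        simpa using this
      have hT' : (T.insert key (joinStripsB seg)).items
          = ((S.insert key (seg.map PySem.Str.strip)).items).map fJoin :=
        items_map_insert _ _ _ _ h
      have := ih rest valid_info v (S.insert key (seg.map PySem.Str.strip))
        (T.insert key (joinStripsB seg)) true key hrestlen hresthead hT'
      refine ⟨this.1, ?_⟩
      rw [this.2]
      conv_rhs => rw [segLoopB]

-- ===== VERDICT (by name: the statement is the Claim_ definition above) =====
theorem filter_song_folk_rnn_py_spec : Claim_equal_filter_song_folk_rnn_py := by
  intro song_lines valid_info _ _
  unfold Spec_filter_song_folk_rnn_py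
  simp only [filter_song_folk_rnn_py, filter_song_folk_rnn_py_alt]
  rw [a_fold_filter]
  set lines := song_lines.filter (fun l => PySem.Str.strip l ≠ "") with hlines
  set header := lines.takeWhile (fun l => !isKeyLineB l) with hheader
  set body := lines.dropWhile (fun l => !isKeyLineB l) with hbody
  have hsplit : lines = header ++ body := (List.takeWhile_append_dropWhile).symm
  rw [hsplit, List.foldl_append]
  rw [header_fold header valid_info _ _ _ (fun l hl => by simpa using List.mem_takeWhile_imp hl)]
  set vB := header.foldl (vStepB valid_info) PySem.Dict.empty with hvB
  have hhead : ∀ h : body ≠ [], isKeyLineB (body.head h) = true := by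
    intro hne
    have := List.head_dropWhile_not (fun l => !isKeyLineB l) hne
    simpa using this
  obtain ⟨h1, h2⟩ := body_fold body.length body valid_info vB PySem.Dict.empty PySem.Dict.empty
    false "" (Nat.le_refl _) hhead (by rfl)
  rw [← h2, List.map_map]
  apply List.map_congr_left
  intro p _
  simp [fJoin, h1]
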